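-- pv_equiv track=rewrite | github.com/gyanendra2007/astro-web | app.py | calculate_soul_urge_number
-- ===== SOURCE A (Python) =====
-- def calculate_soul_urge_number(name):
--     vowels = 'AEIOU'
--     alphabet_to_number = {'A': 1, 'B': 2, 'C': 3, 'D': 4, 'E': 5, 'F': 6, 'G': 7, 'H': 8, 'I': 9,
--                           'J': 1, 'K': 2, 'L': 3, 'M': 4, 'N': 5, 'O': 6, 'P': 7, 'Q': 8, 'R': 9,
--                           'S': 1, 'T': 2, 'U': 3, 'V': 4, 'W': 5, 'X': 6, 'Y': 7, 'Z': 8}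
--     soul_urge_number = sum([alphabet_to_number[letter] for letter in name.upper() if letter in vowels])
--     while soul_urge_number > 9:
--         soul_urge_number = sum([int(digit) for digit in str(soul_urge_number)])
--     return soul_urge_number
-- ===== SOURCE B (Python) =====
-- def calculate_soul_urge_number(name):
--     total = 0
--     for ch in name.upper():
--         if ch in 'AEIOU':
--             total += (ord(ch) - 65) % 9 + 1
--     return 0 if total == 0 else 1 + (total - 1) % 9
-- ===== Notes on version B (the rewrite author's own statement) =====
-- stated objective: simpler
-- what changed: Replaces the 26-entry lookup dict by the arithmetic letter value (ord(c)-65)%9+1 accumulated in one pass, and replaces the iterated digit-summing while-loop by the closed-form digital root 1+(total-1)%9 (0 when there are no vowels).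
import Mathlib
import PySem

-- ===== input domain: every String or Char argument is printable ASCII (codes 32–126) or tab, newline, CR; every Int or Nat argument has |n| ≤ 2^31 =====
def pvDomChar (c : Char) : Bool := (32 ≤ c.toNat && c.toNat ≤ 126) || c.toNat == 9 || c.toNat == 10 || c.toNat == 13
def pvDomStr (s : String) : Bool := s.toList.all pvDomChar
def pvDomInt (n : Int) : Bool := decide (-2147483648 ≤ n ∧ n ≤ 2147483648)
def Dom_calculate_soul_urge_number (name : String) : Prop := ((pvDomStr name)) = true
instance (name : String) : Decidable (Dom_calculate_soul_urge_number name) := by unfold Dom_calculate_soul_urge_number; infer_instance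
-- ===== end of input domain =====

-- B replaces A's lookup dict by the arithmetic letter value (ord(c)-65)%9+1 summed in one
-- pass and the digit-summing while-loop by the closed-form digital root (objective: simpler).


-- ===== PORT A =====
-- the literal alphabet_to_number dict (char keys stand for Python's 1-char strings)
def pvAlphabet : PySem.Dict Char Int := PySem.Dict.ofList
  [('A',1),('B',2),('C',3),('D',4),('E',5),('F',6),('G',7),('H',8),('I',9),
   ('J',1),('K',2),('L',3),('M',4),('N',5),('O',6),('P',7),('Q',8),('R',9),
   ('S',1),('T',2),('U',3),('V',4),('W',5),('X',6),('Y',7),('Z',8)]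

-- sum([int(digit) for digit in str(n)]); int(d) is exact via getD 0: for the positive n the
-- loop feeds in, str(n) consists of digit chars only, so ofChars? is never none there
def pvDigitSum (n : Int) : Int :=
  ((PySem.Int.toChars n).map (fun c => (PySem.Int.ofChars? [c]).getD 0)).sum

-- the 'while soul_urge_number > 9' loop; fuel only makes it total (each iteration strictly
-- decreases the positive value, so fuel = value suffices — proved below, Claim unaffected)
def pvReduce : Nat → Int → Int
  | 0, n => n
  | fuel + 1, n => if 9 < n then pvReduce fuel (pvDigitSum n) else n

-- 'letter in vowels' for a 1-char letter is char membership; dict lookup as getD 0 is exact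
-- since every char passing the vowel filter is a key of the dict
def calculate_soul_urge_number (name : String) : Int :=
  let vowels := "AEIOU".toList
  let soul_urge_number :=
    (((PySem.Str.upper name).toList.filter (fun c => vowels.contains c)).map
      (fun c => pvAlphabet.getD c 0)).sum
  pvReduce soul_urge_number.toNat soul_urge_number

-- ===== PORT B =====
def calculate_soul_urge_number_alt (name : String) : Int :=
  let total := (PySem.Str.upper name).toList.foldl
    (fun acc c => if ("AEIOU".toList).contains c
                  then acc + (PySem.Int.mod ((c.toNat : Int) - 65) 9 + 1) else acc) 0
  if total == 0 then 0 else 1 + PySem.Int.mod (total - 1) 9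

-- ===== PRECONDITION & SPEC =====
def Spec_calculate_soul_urge_number (name : String) (out : Int) : Prop := out = calculate_soul_urge_number_alt name
instance (name : String) (out : Int) : Decidable (Spec_calculate_soul_urge_number name out) := by unfold Spec_calculate_soul_urge_number; infer_instance

-- ===== CLAIM (what is proved, stated in full; the proofs are below) =====
def Claim_equal_calculate_soul_urge_number : Prop := ∀ (name : String), Dom_calculate_soul_urge_number name → Spec_calculate_soul_urge_number name (calculate_soul_urge_number name)

-- ===== LEMMAS AND PROOFS =====

-- value of a vowel in the dict = B's arithmetic formula
theorem pv_vowel_val (c : Char) (h : ("AEIOU".toList).contains c = true) :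
    pvAlphabet.getD c 0 = PySem.Int.mod ((c.toNat : Int) - 65) 9 + 1 := by
  simp only [List.contains_eq_mem, String.toList, decide_eq_true_eq] at h
  fin_cases h <;> decide

-- B's accumulating pass equals A's filter-map sum
theorem pv_foldl_eq_sum (cs : List Char) (acc : Int) :
    cs.foldl (fun acc c => if ("AEIOU".toList).contains c
                  then acc + (PySem.Int.mod ((c.toNat : Int) - 65) 9 + 1) else acc) acc
    = acc + ((cs.filter (fun c => ("AEIOU".toList).contains c)).map
        (fun c => pvAlphabet.getD c 0)).sum := by
  induction cs generalizing acc with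
  | nil => simp
  | cons c cs ih =>
    by_cases h : ("AEIOU".toList).contains c = true
    · simp only [List.foldl_cons, List.filter_cons, h, if_pos, List.map_cons, List.sum_cons]
      rw [ih, pv_vowel_val c h]; ring
    · simp only [List.foldl_cons, List.filter_cons, h]
      rw [ih]; simp

-- Nat.toDigitsCore produces the reversed base-10 digits (as chars)
theorem pv_toDigitsCore_eq (fuel : Nat) : ∀ (n : Nat) (acc : List Char), 0 < n → n ≤ fuel →
    Nat.toDigitsCore 10 fuel n acc = ((Nat.digits 10 n).map Nat.digitChar).reverse ++ acc := by
  induction fuel with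
  | zero => intro n acc hn hf; omega
  | succ fuel ih =>
    intro n acc hn hf
    rw [Nat.digits_def' (by norm_num : (1:ℕ) < 10) hn]
    by_cases h : n / 10 = 0
    · simp [Nat.toDigitsCore, h]
    · have hlt : n / 10 < n := Nat.div_lt_self hn (by norm_num)
      simp only [Nat.toDigitsCore, h]
      rw [ih (n / 10) _ (Nat.pos_of_ne_zero h) (by omega)]
      simp

theorem pv_digitChar_val (d : Nat) (h : d < 10) :
    (PySem.Int.ofChars? [Nat.digitChar d]).getD 0 = (d : Int) := by
  interval_cases d <;> decide

-- pvDigitSum of a positive int is the sum of its base-10 digits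
theorem pv_digitSum_eq (m : Nat) (hm : 0 < m) :
    pvDigitSum (m : Int) = ((Nat.digits 10 m).sum : Int) := by
  unfold pvDigitSum PySem.Int.toChars
  rw [if_neg (by omega), Nat.toDigits,
      pv_toDigitsCore_eq _ _ _ (by simpa using hm) (by simp)]
  rw [List.append_nil, List.map_reverse, List.sum_reverse, List.map_map,
      Nat.cast_list_sum]
  congr 1
  apply List.map_congr_left
  intro d hd
  exact pv_digitChar_val d (Nat.digits_lt_base (by norm_num) hd)

theorem pv_sum_digits_pos : ∀ (m : Nat), 0 < m → 0 < (Nat.digits 10 m).sum := by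
  intro m
  induction m using Nat.strong_induction_on with
  | _ m ih =>
    intro hm
    rw [Nat.digits_def' (by norm_num : (1:ℕ) < 10) hm, List.sum_cons]
    by_cases h : m % 10 = 0
    · have h10 : 0 < m / 10 := by omega
      have := ih (m / 10) (Nat.div_lt_self hm (by norm_num)) h10
      omega
    · omega

theorem pv_sum_digits_lt (m : Nat) (hm : 10 ≤ m) : (Nat.digits 10 m).sum < m := by
  rw [Nat.digits_def' (by norm_num : (1:ℕ) < 10) (by omega), List.sum_cons]
  have h1 : (Nat.digits 10 (m / 10)).sum ≤ m / 10 := Nat.digit_sum_le 10 (m / 10)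
  have h2 : m % 10 + 10 * (m / 10) = m := Nat.mod_add_div m 10
  have h3 : 1 ≤ m / 10 := by omega
  omega

-- the while-loop computes the digital root
theorem pv_reduce_droot : ∀ (fuel : Nat) (n : Int), 0 ≤ n → n.toNat ≤ fuel →
    pvReduce fuel n = if n = 0 then 0 else 1 + PySem.Int.mod (n - 1) 9 := by
  intro fuel
  induction fuel with
  | zero =>
    intro n hn hf
    have : n = 0 := by omega
    simp [pvReduce, this]
  | succ fuel ih =>
    intro n hn hf
    by_cases h9 : 9 < n
    · have hk : n = ((n.toNat : Nat) : Int) := by omega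
      set k := n.toNat with hkdef
      have hk10 : 10 ≤ k := by omega
      have hds : pvDigitSum n = ((Nat.digits 10 k).sum : Int) := by
        rw [hk]; exact pv_digitSum_eq k (by omega)
      have hpos : 0 < (Nat.digits 10 k).sum := pv_sum_digits_pos k (by omega)
      have hlt : (Nat.digits 10 k).sum < k := pv_sum_digits_lt k hk10
      have hmod : k % 9 = (Nat.digits 10 k).sum % 9 := Nat.modEq_nine_digits_sum k
      have hdsnn : 0 ≤ pvDigitSum n := by rw [hds]; omega
      have hfuel : (pvDigitSum n).toNat ≤ fuel := by rw [hds]; omega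
      simp only [pvReduce, if_pos h9]
      rw [ih (pvDigitSum n) hdsnn hfuel]
      rw [hds, hk]
      have h1 : ((Nat.digits 10 k).sum : Int) ≠ 0 := by omega
      have h2 : ((k : Nat) : Int) ≠ 0 := by omega
      rw [if_neg h1, if_neg h2,
          PySem.Int.mod_eq_emod_of_pos (by norm_num : (0:Int) < 9),
          PySem.Int.mod_eq_emod_of_pos (by norm_num : (0:Int) < 9)]
      omega
    · simp only [pvReduce, if_neg h9]
      rw [PySem.Int.mod_eq_emod_of_pos (by norm_num)]
      by_cases h0 : n = 0
      · simp [h0]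
      · rw [if_neg h0]
        have : (n - 1) % 9 = n - 1 := Int.emod_eq_of_lt (by omega) (by omega)
        omega

-- ===== VERDICT (by name: the statement is the Claim_ definition above) =====
theorem calculate_soul_urge_number_spec : Claim_equal_calculate_soul_urge_number := by
  unfold Claim_equal_calculate_soul_urge_number
  intro name _
  unfold Spec_calculate_soul_urge_number calculate_soul_urge_number calculate_soul_urge_number_alt
  set cs := (PySem.Str.upper name).toList with hcs
  set S := ((cs.filter (fun c => ("AEIOU".toList).contains c)).map
      (fun c => pvAlphabet.getD c 0)).sum with hS
  have htot : cs.foldl (fun acc c => if ("AEIOU".toList).contains c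
                  then acc + (PySem.Int.mod ((c.toNat : Int) - 65) 9 + 1) else acc) 0 = S := by
    rw [pv_foldl_eq_sum]; ring
  have hSnn : 0 ≤ S := by
    apply List.sum_nonneg
    intro x hx
    rcases List.mem_map.mp hx with ⟨c, hc, rfl⟩
    have hcv : ("AEIOU".toList).contains c = true := (List.mem_filter.mp hc).2
    rw [pv_vowel_val c hcv]
    have := PySem.Int.mod_nonneg ((c.toNat : Int) - 65) (by norm_num : (0:Int) < 9)
    omega
  simp only [htot]
  rw [pv_reduce_droot S.toNat S hSnn (le_refl _)]
  by_cases h0 : S = 0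
  · simp [h0]
  · rw [if_neg h0, if_neg (by simpa using h0)]
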